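-- pv_equiv track=rewrite | github.com/wunianjian/mrc_event_detection | base/nn/utils/accumulator.py | add_bio
-- ===== SOURCE A (Python) =====
-- def add_bio(tags):
--     inlabel = False
--     tags_ = []
--     for x in tags:
--         if x == 'O' or x == 'Other':
--             tags_.append(x)
--             inlabel = False
--         elif inlabel:
--             tags_.append("I-" + x)
--         else:
--             tags_.append("B-" + x)
--             inlabel = True
--     return tags_
-- ===== SOURCE B (Python) =====
-- from itertools import groupby
--
-- def add_bio(tags):
--     out = []
--     for is_o, group in groupby(tags, key=lambda x: x == 'O' or x == 'Other'):
--         if is_o: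
--             out.extend(group)
--         else:
--             first = next(group)
--             out.append('B-' + first)
--             out.extend('I-' + x for x in group)
--     return out
-- ===== Notes on version B (the rewrite author's own statement) =====
-- stated objective: alternative
-- what changed: Replaces the stateful inlabel flag with itertools.groupby partitioning tags into maximal runs of O/Other vs label tags, emitting B- for each run head and I- for the rest.
import Mathlib
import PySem

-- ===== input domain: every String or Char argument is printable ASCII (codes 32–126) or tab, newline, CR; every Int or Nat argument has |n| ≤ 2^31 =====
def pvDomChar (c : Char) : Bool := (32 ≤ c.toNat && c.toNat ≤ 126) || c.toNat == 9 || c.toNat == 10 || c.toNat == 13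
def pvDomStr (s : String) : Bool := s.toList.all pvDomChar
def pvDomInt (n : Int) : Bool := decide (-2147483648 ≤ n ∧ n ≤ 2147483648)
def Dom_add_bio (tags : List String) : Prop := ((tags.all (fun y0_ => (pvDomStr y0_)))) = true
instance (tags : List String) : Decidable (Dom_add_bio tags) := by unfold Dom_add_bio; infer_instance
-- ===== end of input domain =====

-- B restates A's stateful inlabel-flag loop as a partition into maximal runs (groupby); same output, alternative decomposition.

-- ===== PORT A =====
-- A's loop: state (inlabel, tags_), one pass over tags.
def add_bio (tags : List String) : List String :=
  (tags.foldl (fun (st : Bool × List String) x =>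
      if x == "O" || x == "Other" then (false, st.2 ++ [x])
      else if st.1 then (st.1, st.2 ++ ["I-" ++ x])
      else (true, st.2 ++ ["B-" ++ x]))
    (false, [])).2

-- ===== PORT B =====
def bioIsO (x : String) : Bool := x == "O" || x == "Other"

-- B: groupby — an O/Other tag passes through; a run head gets "B-", the rest of the run "I-".
def add_bio_alt : List String → List String
  | [] => []
  | x :: rest =>
    if bioIsO x then x :: add_bio_alt rest
    else
      ("B-" ++ x) ::
        ((rest.takeWhile (fun y => !(bioIsO y))).map (fun y => "I-" ++ y) ++
          add_bio_alt (rest.dropWhile (fun y => !(bioIsO y))))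
termination_by ts => ts.length
decreasing_by
  · simp
  · exact Nat.lt_succ_of_le (List.length_dropWhile_le _ _)

-- ===== PRECONDITION & SPEC =====
def Spec_add_bio (tags : List String) (out : List String) : Prop := out = add_bio_alt tags
instance (tags : List String) (out : List String) : Decidable (Spec_add_bio tags out) := by unfold Spec_add_bio; infer_instance

-- ===== CLAIM (what is proved, stated in full; the proofs are below) =====
def Claim_equal_add_bio : Prop := ∀ (tags : List String), Dom_add_bio tags → Spec_add_bio tags (add_bio tags)

-- ===== LEMMAS AND PROOFS =====

-- pure recursive description of A's loop body
def bioA (inlabel : Bool) : List String → List String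
  | [] => []
  | x :: ts =>
    if bioIsO x then x :: bioA false ts
    else if inlabel then ("I-" ++ x) :: bioA true ts
    else ("B-" ++ x) :: bioA true ts

theorem bioA_foldl (ts : List String) : ∀ (b : Bool) (acc : List String),
    (ts.foldl (fun (st : Bool × List String) x =>
      if x == "O" || x == "Other" then (false, st.2 ++ [x])
      else if st.1 then (st.1, st.2 ++ ["I-" ++ x])
      else (true, st.2 ++ ["B-" ++ x])) (b, acc)).2 = acc ++ bioA b ts := by
  induction ts with
  | nil => intro b acc; simp [bioA]
  | cons x ts ih =>
    intro b acc
    simp only [List.foldl]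
    by_cases h : (x == "O" || x == "Other") = true
    · rw [if_pos h, ih]
      simp [bioA, bioIsO, h]
    · cases b with
      | false =>
        rw [if_neg h, if_neg (by simp : ¬((false, acc).1 = true)), ih]
        simp [bioA, bioIsO, h]
      | true =>
        rw [if_neg h, if_pos (rfl : (true, acc).1 = true), ih]
        simp [bioA, bioIsO, h]

theorem bioA_true (ts : List String) :
    bioA true ts = (ts.takeWhile (fun y => !(bioIsO y))).map (fun y => "I-" ++ y) ++
      bioA false (ts.dropWhile (fun y => !(bioIsO y))) := by
  induction ts with
  | nil => simp [bioA]
  | cons x ts ih =>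
    by_cases h : bioIsO x
    · simp [bioA, h, List.takeWhile, List.dropWhile]
    · simp [bioA, h, List.takeWhile, List.dropWhile, ih]

theorem bioA_false_alt (ts : List String) : bioA false ts = add_bio_alt ts := by
  induction ts using add_bio_alt.induct with
  | case1 => simp [bioA, add_bio_alt]
  | case2 x rest h ih => simp [bioA, add_bio_alt, h, ih]
  | case3 x rest h ih => simp [bioA, add_bio_alt, h, bioA_true, ih]

-- ===== VERDICT (by name: the statement is the Claim_ definition above) =====
theorem add_bio_spec : Claim_equal_add_bio := by
  intro tags _
  show _ = _
  rw [add_bio, bioA_foldl, bioA_false_alt]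
  simp
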